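-- pv_equiv track=rewrite | github.com/SRIHARIARUMURU/Python | strings.py | capital
-- ===== SOURCE A (Python) =====
-- def capital(a):
--     b=""
--     c=""
--     for i in a:
--         if i.isupper():
--             b+=i
--         else:
--             c+=i
--     return b+c
-- ===== SOURCE B (Python) =====
-- def capital(a):
--     return ''.join(sorted(a, key=lambda c: not c.isupper()))
-- ===== Notes on version B (the rewrite author's own statement) =====
-- stated objective: idiomatic
-- what changed: Replaces the explicit accumulate-into-two-strings loop with a single stable sort keyed on whether the character is non-uppercase, joined at the end; sort stability preserves the relative order within each class.
import Mathlib
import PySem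

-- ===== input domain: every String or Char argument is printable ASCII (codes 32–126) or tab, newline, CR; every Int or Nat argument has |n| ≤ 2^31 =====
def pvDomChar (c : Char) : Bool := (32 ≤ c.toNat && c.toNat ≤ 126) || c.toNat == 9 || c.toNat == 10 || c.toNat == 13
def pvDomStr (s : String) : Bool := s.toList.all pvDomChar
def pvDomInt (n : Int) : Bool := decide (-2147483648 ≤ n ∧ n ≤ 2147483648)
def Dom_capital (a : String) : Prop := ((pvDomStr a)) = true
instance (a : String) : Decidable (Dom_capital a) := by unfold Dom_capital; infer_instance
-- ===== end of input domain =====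

-- B replaces A's accumulate-into-two-strings loop by one stable sort keyed on "not uppercase" plus a join (idiomatic).

-- ===== PORT A =====
-- A builds two strings b (uppercase chars) and c (the rest) in one pass and returns b+c.
def capital (a : String) : String :=
  let p := a.toList.foldl
    (fun (s : List Char × List Char) i =>
      if PySem.Chars.isupper i then (s.1 ++ [i], s.2) else (s.1, s.2 ++ [i]))
    ([], [])
  String.ofList (p.1 ++ p.2)

-- ===== PORT B =====
-- ''.join(sorted(a, key=lambda c: not c.isupper()))
def capital_alt (a : String) : String :=
  String.ofList (PySem.List.sorted a.toList (fun c => !PySem.Chars.isupper c) false)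

-- ===== PRECONDITION & SPEC =====
def Spec_capital (a : String) (out : String) : Prop := out = capital_alt a
instance (a : String) (out : String) : Decidable (Spec_capital a out) := by unfold Spec_capital; infer_instance

-- ===== CLAIM (what is proved, stated in full; the proofs are below) =====
def Claim_equal_capital : Prop := ∀ (a : String), Dom_capital a → Spec_capital a (capital a)

-- ===== LEMMAS AND PROOFS =====

-- A's loop accumulates exactly the two filters, in order.
theorem foldA_eq (xs : List Char) : ∀ (b c : List Char),
    xs.foldl
      (fun (s : List Char × List Char) i =>
        if PySem.Chars.isupper i then (s.1 ++ [i], s.2) else (s.1, s.2 ++ [i]))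
      (b, c)
    = (b ++ xs.filter (fun i => PySem.Chars.isupper i),
       c ++ xs.filter (fun i => !PySem.Chars.isupper i)) := by
  induction xs with
  | nil => intro b c; simp
  | cons x xs ih =>
    intro b c
    by_cases h : PySem.Chars.isupper x
    · simp [List.foldl, h, ih]
    · simp [List.foldl, h, ih]

-- insertBy of a middle-class element: upper chars (key = false) insert right at the boundary.
theorem insertBy_mid (key : Char → Bool) (x : Char) (hx : key x = false) :
    ∀ (u v : List Char), (∀ y ∈ u, key y = false) →
      (∀ y ∈ v, key y = true) →
      PySem.List.insertBy (fun a b => decide (key a < key b)) x (u ++ v) = u ++ x :: v := by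
  intro u
  induction u with
  | nil =>
    intro v _ hv
    cases v with
    | nil => simp [PySem.List.insertBy]
    | cons y ys =>
      have hy : key y = true := hv y (by simp)
      simp [PySem.List.insertBy, hx, hy]
  | cons a u' ih =>
    intro v hu hv
    have ha : key a = false := hu a (by simp)
    simp [PySem.List.insertBy, hx, ha, ih v (fun y hy => hu y (by simp [hy])) hv]

-- insertBy of a non-upper element (key = true): appended at the end.
theorem insertBy_end (key : Char → Bool) (x : Char) (hx : key x = true) (ys : List Char) :
    PySem.List.insertBy (fun a b => decide (key a < key b)) x ys = ys ++ [x] := by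
  apply PySem.List.insertBy_of_forall_not_before
  intro y _
  cases hky : key y <;> simp [hx]

-- The insertion-sort fold keeps the partition invariant.
theorem foldl_ins (xs : List Char) : ∀ (u v : List Char),
    (∀ y ∈ u, (!PySem.Chars.isupper y) = false) →
    (∀ y ∈ v, (!PySem.Chars.isupper y) = true) →
    xs.foldl
      (fun acc x => PySem.List.insertBy
        (fun a b => decide ((!PySem.Chars.isupper a) < (!PySem.Chars.isupper b))) x acc)
      (u ++ v)
    = (u ++ xs.filter (fun i => PySem.Chars.isupper i))
      ++ (v ++ xs.filter (fun i => !PySem.Chars.isupper i)) := by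
  induction xs with
  | nil => intro u v _ _; simp
  | cons x xs ih =>
    intro u v hu hv
    by_cases h : PySem.Chars.isupper x
    · have hstep := insertBy_mid (fun c => !PySem.Chars.isupper c) x (by simp [h]) u v hu hv
      have := ih (u ++ [x]) v
        (by intro y hy; rcases List.mem_append.mp hy with hy | hy
            · exact hu y hy
            · simp at hy; simp [hy, h]) hv
      simp only [List.foldl, hstep]
      rw [show u ++ x :: v = (u ++ [x]) ++ v by simp, this]
      simp [h]
    · have hstep := insertBy_end (fun c => !PySem.Chars.isupper c) x (by simp [h]) (u ++ v)
      have := ih u (v ++ [x]) hu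
        (by intro y hy; rcases List.mem_append.mp hy with hy | hy
            · exact hv y hy
            · simp at hy; simp [hy, h])
      simp only [List.foldl, hstep]
      rw [show (u ++ v) ++ [x] = u ++ (v ++ [x]) by simp, this]
      simp [h]

theorem sorted_eq_partition (xs : List Char) :
    PySem.List.sorted xs (fun c => !PySem.Chars.isupper c) false
    = xs.filter (fun i => PySem.Chars.isupper i)
      ++ xs.filter (fun i => !PySem.Chars.isupper i) := by
  rw [PySem.List.sorted_eq_foldl_insertBy]
  have := foldl_ins xs [] [] (by simp) (by simp)
  simpa using this

-- ===== VERDICT (by name: the statement is the Claim_ definition above) =====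
theorem capital_spec : Claim_equal_capital := by
  intro a _
  unfold Spec_capital capital capital_alt
  rw [sorted_eq_partition, foldA_eq]
  simp
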